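-- pv_equiv track=rewrite | github.com/haydenwies/cs1026-assignments | Assignment 02/Assign2.py | main_compare
-- ===== SOURCE A (Python) =====
-- def main_compare(converted_name_list):
--     """main_compare -> Compares all names and corresponding soundex encodings to check which sound similar. Parameters -> converted_name_list: List formatted by main_soundex. Returns -> List of tuples which include the name and soundex encoding of 2 unique names that sound the same."""
--
--     # List for holding matches
--     matches = []
--
--     # Itterate list of name objects (with name and soundex_code property)
--     for name in converted_name_list:
--         # List to hold all name objects that have the same soundex_code
--         match = []
--
--         # Itterate through name list again and add matches to list
--         # Skip name that is already being compared
--         for compare_name in converted_name_list: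
--
--             # Add name that's being compared to list
--             match.append(name)
--
--             if name[0] == compare_name[0] and name[1] != compare_name[1]:
--                 match.append(compare_name)
--                 # Sort match and add to matches if it contains more than one name object
--                 # All match lists contain at least one name object from initial append (match.append(name))
--                 sorted_match = []
--                 sorted_match.append(min(match))
--                 sorted_match.append(max(match))
--                 if sorted_match not in matches and len(match) > 1:
--                     matches.append(sorted_match)
--             match.clear()
--
--     return (matches)
-- ===== SOURCE B (Python) =====
-- def main_compare(converted_name_list):
--     # Group entries by soundex code once, then enumerate each pair only inside
--     # its group and only once (i < j), deduplicating with a set.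
--     groups = {}
--     for i, entry in enumerate(converted_name_list):
--         groups.setdefault(entry[0], []).append((i, entry))
--     matches = []
--     seen = set()
--     for i, entry in enumerate(converted_name_list):
--         for j, other in groups[entry[0]]:
--             if j > i and other[1] != entry[1]:
--                 pair = (entry, other) if entry[1] <= other[1] else (other, entry)
--                 if pair not in seen:
--                     seen.add(pair)
--                     matches.append([pair[0], pair[1]])
--     return matches
-- ===== Notes on version B (the rewrite author's own statement) =====
-- stated objective: faster
-- what changed: A rescans the whole list for every element and dedups by scanning the output list; B builds a dict grouping entries by soundex code once, enumerates each unordered pair within its group only once (index i < j), and dedups with a set.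
import Mathlib
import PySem

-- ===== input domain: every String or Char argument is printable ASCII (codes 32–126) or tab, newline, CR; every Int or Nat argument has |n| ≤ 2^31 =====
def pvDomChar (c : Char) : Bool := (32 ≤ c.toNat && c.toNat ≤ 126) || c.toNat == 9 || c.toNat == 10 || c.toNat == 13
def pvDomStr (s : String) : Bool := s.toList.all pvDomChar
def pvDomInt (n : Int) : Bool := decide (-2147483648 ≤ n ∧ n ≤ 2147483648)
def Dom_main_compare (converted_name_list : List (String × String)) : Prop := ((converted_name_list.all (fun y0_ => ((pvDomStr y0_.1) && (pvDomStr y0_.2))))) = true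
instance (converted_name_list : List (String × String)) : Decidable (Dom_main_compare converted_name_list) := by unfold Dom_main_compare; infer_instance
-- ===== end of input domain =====

-- B replaces A's repeated full rescans of the whole list by one grouping pass (a dict keyed by
-- soundex code) plus within-group enumeration of each unordered pair once, deduplicated with a set.

-- ===== PORT A =====
-- Python tuple '<' on a pair of strings (lexicographic); Mathlib's '<' on Prod is pointwise, so ported by hand — exact
def pvTupLt (a b : String × String) : Bool := a.1 < b.1 || (a.1 == b.1 && a.2 < b.2)

def main_compare (converted_name_list : List (String × String)) : List (List (String × String)) :=
  converted_name_list.foldl (fun matches_ name =>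
    converted_name_list.foldl (fun matches_ compare_name =>
      if name.1 = compare_name.1 ∧ name.2 ≠ compare_name.2 then
        let matchL := [name, compare_name]
        -- min(match)/max(match) on the two-element list, hand-ported with pvTupLt (Python's running min/max) — exact
        let sorted_match := [if pvTupLt compare_name name then compare_name else name,
                             if pvTupLt name compare_name then compare_name else name]
        if sorted_match ∉ matches_ ∧ matchL.length > 1 then matches_ ++ [sorted_match]
        else matches_
      else matches_) matches_) []

-- ===== PORT B =====
def main_compare_alt (converted_name_list : List (String × String)) : List (List (String × String)) :=
  let groups : PySem.Dict String (List (Int × (String × String))) :=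
    (PySem.List.enumerate converted_name_list).foldl
      (fun d p => d.modify p.2.1 [] (· ++ [p])) PySem.Dict.empty
  ((PySem.List.enumerate converted_name_list).foldl
    (fun st p =>
      (groups.getD p.2.1 []).foldl
        (fun st q =>
          if q.1 > p.1 ∧ q.2.2 ≠ p.2.2 then
            let pair := if p.2.2 ≤ q.2.2 then (p.2, q.2) else (q.2, p.2)
            if pair ∉ st.2 then (st.1 ++ [[pair.1, pair.2]], PySem.Set.add st.2 pair)
            else st
          else st) st)
    ((([], PySem.Set.empty) : List (List (String × String)) × PySem.Set ((String × String) × (String × String))))).1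

-- ===== PRECONDITION & SPEC =====
def Spec_main_compare (converted_name_list : List (String × String)) (out : List (List (String × String))) : Prop := out = main_compare_alt converted_name_list
instance (converted_name_list : List (String × String)) (out : List (List (String × String))) : Decidable (Spec_main_compare converted_name_list out) := by unfold Spec_main_compare; infer_instance

-- ===== CLAIM (what is proved, stated in full; the proofs are below) =====
def Claim_equal_main_compare : Prop := ∀ (converted_name_list : List (String × String)), Dom_main_compare converted_name_list → Spec_main_compare converted_name_list (main_compare converted_name_list)

-- ===== LEMMAS AND PROOFS =====

-- the condition under which A records a pair, and the recorded (sorted) pair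
abbrev pvCond (x y : String × String) : Prop := x.1 = y.1 ∧ x.2 ≠ y.2

def pvCand (x y : String × String) : List (String × String) :=
  if y.2 < x.2 then [y, x] else [x, y]

def pvToL (pr : (String × String) × (String × String)) : List (String × String) := [pr.1, pr.2]

-- rows of candidate pairs, indexed over the enumerated list
def pvRowSq (xs : List (String × String)) (p : Int × (String × String)) : List (List (String × String)) :=
  ((PySem.List.enumerate xs).filter (fun q => decide (pvCond p.2 q.2))).map (fun q => pvCand p.2 q.2)

def pvRowDup (xs : List (String × String)) (p : Int × (String × String)) : List (List (String × String)) :=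
  ((PySem.List.enumerate xs).filter (fun q => decide (q.1 < p.1 ∧ pvCond p.2 q.2))).map (fun q => pvCand p.2 q.2)

def pvRowTri (xs : List (String × String)) (p : Int × (String × String)) : List (List (String × String)) :=
  ((PySem.List.enumerate xs).filter (fun q => decide (p.1 < q.1 ∧ pvCond p.2 q.2))).map (fun q => pvCand p.2 q.2)


lemma pvCand_symm (x y : String × String) (h : x.2 ≠ y.2) : pvCand x y = pvCand y x := by
  unfold pvCand
  rcases lt_trichotomy x.2 y.2 with h1 | h1 | h1
  · rw [if_pos h1, if_neg (not_lt.mpr h1.le)]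
  · exact absurd h1 h
  · rw [if_neg (not_lt.mpr h1.le), if_pos h1]

lemma pvToL_pair (x y : String × String) :
    pvToL (if x.2 ≤ y.2 then (x, y) else (y, x)) = pvCand x y := by
  unfold pvToL pvCand
  by_cases h : x.2 ≤ y.2
  · rw [if_pos h, if_neg (not_lt.mpr h)]
  · rw [if_neg h, if_pos (not_le.mp h)]

lemma pvToL_inj : Function.Injective pvToL := by
  intro a b h
  simp only [pvToL, List.cons.injEq, and_true] at h
  exact Prod.ext h.1 h.2

lemma pv_foldl_update {β : Type} [BEq β] [LawfulBEq β] {α : Type} (l : List α)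
    (g : α → List β) (s : PySem.Set β) :
    l.foldl (fun s x => PySem.Set.update s (g x)) s = PySem.Set.update s (l.flatMap g) := by
  induction l generalizing s with
  | nil => simp [PySem.Set.update_nil]
  | cons a t ih => simp [List.foldl_cons, ih, PySem.Set.update_append]

lemma pv_update_of_forall_mem {β : Type} [BEq β] [LawfulBEq β] (l : List β) (s : PySem.Set β)
    (h : ∀ v ∈ l, v ∈ s) : PySem.Set.update s l = s := by
  rw [PySem.Set.update_eq_append_filter]
  have h2 : (PySem.Set.ofList l).filter (fun y => !(PySem.Set.contains s y)) = [] := by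
    apply List.filter_eq_nil_iff.mpr
    intro v hv
    simp [h v ((PySem.Set.mem_ofList l v).mp hv)]
  rw [h2, List.append_nil]

lemma pv_map_ofList (l : List ((String × String) × (String × String))) :
    (PySem.Set.ofList l).map pvToL = PySem.Set.ofList (l.map pvToL) := by
  induction l using List.reverseRecOn with
  | nil => rfl
  | append_singleton t a ih =>
    rw [PySem.Set.ofList_append_singleton, List.map_append, List.map_singleton,
      PySem.Set.ofList_append_singleton, ← ih]
    rw [PySem.Set.add_eq_ite, PySem.Set.add_eq_ite]
    by_cases hm : a ∈ PySem.Set.ofList t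
    · rw [if_pos hm, if_pos (List.mem_map_of_mem hm)]
    · rw [if_neg hm, if_neg (fun hc => hm (by
        obtain ⟨b, hb, he⟩ := List.mem_map.mp hc
        exact (pvToL_inj he) ▸ hb)), List.map_append, List.map_singleton]

-- splitting A's row at the diagonal (the diagonal itself produces nothing)
lemma pv_row_split (xs : List (String × String)) (p : Int × (String × String))
    (hp : p ∈ PySem.List.enumerate xs) :
    pvRowSq xs p = pvRowDup xs p ++ pvRowTri xs p := by
  unfold pvRowSq pvRowDup pvRowTri
  rw [← List.map_append]
  congr 1
  obtain ⟨k, hk, hpk⟩ := (PySem.List.mem_enumerate_iff xs 0 p).mp hp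
  have hp1 : p.1 = (k : Int) := by rw [hpk]; simp
  have hp2 : p.2 = xs[k] := by rw [hpk]
  have hlen : (xs.take k).length = k := by simp [Nat.le_of_lt hk]
  have hx : PySem.List.enumerate xs = PySem.List.enumerate (xs.take k) 0
      ++ PySem.List.enumerate (xs.drop k) k := by
    conv_lhs => rw [← List.take_append_drop k xs]
    rw [PySem.List.enumerate_append, hlen]; norm_num
  have hq1 : ∀ q ∈ PySem.List.enumerate (xs.take k) 0, q.1 < (k : Int) := by
    intro q hq
    obtain ⟨k', hk', rfl⟩ := (PySem.List.mem_enumerate_iff _ 0 q).mp hq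
    simp only [hlen] at hk'
    simp; omega
  have hq2 : ∀ q ∈ PySem.List.enumerate (xs.drop k) k, (k : Int) ≤ q.1 ∧ (q.1 = k → q.2 = xs[k]) := by
    intro q hq
    obtain ⟨k', hk', rfl⟩ := (PySem.List.mem_enumerate_iff _ k q).mp hq
    constructor
    · simp
    · intro h
      have : k' = 0 := by omega
      subst this
      simp [List.getElem_drop]
  rw [hx, List.filter_append, List.filter_append, List.filter_append]
  have f1 : List.filter (fun q => decide (pvCond p.2 q.2)) (PySem.List.enumerate (xs.take k) 0)
      = List.filter (fun q => decide (q.1 < p.1 ∧ pvCond p.2 q.2)) (PySem.List.enumerate (xs.take k) 0) := by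
    apply List.filter_congr
    intro q hq
    have := hq1 q hq
    simp only [decide_eq_decide, hp1]
    tauto
  have f2 : List.filter (fun q => decide (pvCond p.2 q.2)) (PySem.List.enumerate (xs.drop k) k)
      = List.filter (fun q => decide (p.1 < q.1 ∧ pvCond p.2 q.2)) (PySem.List.enumerate (xs.drop k) k) := by
    apply List.filter_congr
    intro q hq
    obtain ⟨hge, heq⟩ := hq2 q hq
    simp only [decide_eq_decide, hp1]
    by_cases h : q.1 = (k : Int)
    · have h2 : q.2 = p.2 := by rw [heq h, hp2]
      constructor
      · intro hc; exact absurd rfl (h2 ▸ hc.2)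
      · intro hc; omega
    · have : (k : Int) < q.1 := lt_of_le_of_ne hge (Ne.symm h)
      tauto
  have f3 : List.filter (fun q => decide (p.1 < q.1 ∧ pvCond p.2 q.2)) (PySem.List.enumerate (xs.take k) 0) = [] := by
    apply List.filter_eq_nil_iff.mpr
    intro q hq
    have := hq1 q hq
    simp only [hp1, decide_eq_true_eq]
    intro hc; omega
  have f4 : List.filter (fun q => decide (q.1 < p.1 ∧ pvCond p.2 q.2)) (PySem.List.enumerate (xs.drop k) k) = [] := by
    apply List.filter_eq_nil_iff.mpr
    intro q hq
    have := (hq2 q hq).1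
    simp only [hp1, decide_eq_true_eq]
    intro hc; omega
  rw [f1, f2, f3, f4, List.append_nil, List.nil_append]

-- the central argument: folding the full rows equals folding the upper-triangular rows,
-- because every below-diagonal candidate was already produced by an earlier row
lemma pv_rows_eq (xs : List (String × String)) (R : List (Int × (String × String)))
    (acc : List (List (String × String)))
    (hsuf : R <:+ PySem.List.enumerate xs)
    (hmono : ∀ p ∈ R, ∀ q ∈ PySem.List.enumerate xs, q.1 < p.1 → pvCond p.2 q.2 →
      q ∈ R ∨ pvCand p.2 q.2 ∈ acc) :
    R.foldl (fun acc p => PySem.Set.update acc (pvRowSq xs p)) acc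
      = R.foldl (fun acc p => PySem.Set.update acc (pvRowTri xs p)) acc := by
  induction R generalizing acc with
  | nil => rfl
  | cons p R' ih =>
    have hpL : p ∈ PySem.List.enumerate xs := hsuf.sublist.subset (List.mem_cons_self ..)
    have hpair : (p :: R').Pairwise (fun a b => a.1 < b.1) :=
      List.Pairwise.sublist hsuf.sublist (PySem.List.pairwise_lt_enumerate xs 0)
    have hlt : ∀ q ∈ R', p.1 < q.1 := (List.pairwise_cons.mp hpair).1
    simp only [List.foldl_cons]
    rw [pv_row_split xs p hpL, PySem.Set.update_append]
    have hdup : PySem.Set.update acc (pvRowDup xs p) = acc := by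
      apply pv_update_of_forall_mem
      intro v hv
      unfold pvRowDup at hv
      obtain ⟨q, hqf, rfl⟩ := List.mem_map.mp hv
      have hqL := List.mem_of_mem_filter hqf
      have hcond := of_decide_eq_true (List.mem_filter.mp hqf).2
      rcases hmono p (List.mem_cons_self ..) q hqL hcond.1 hcond.2 with hqR | hacc
      · rcases List.mem_cons.mp hqR with rfl | hqR'
        · exact absurd hcond.1 (lt_irrefl _)
        · exact absurd hcond.1 (not_lt.mpr (le_of_lt (hlt q hqR')))
      · exact hacc
    rw [hdup]
    refine ih _ ((List.suffix_cons p R').trans hsuf) ?_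
    intro p' hp' q hq hlt' hc
    rcases hmono p' (List.mem_cons_of_mem _ hp') q hq hlt' hc with hqR | hacc
    · rcases List.mem_cons.mp hqR with rfl | h
      · right
        rw [PySem.Set.mem_update]
        right
        unfold pvRowTri
        apply List.mem_map.mpr
        refine ⟨p', List.mem_filter.mpr ⟨hsuf.sublist.subset (List.mem_cons_of_mem _ hp'), ?_⟩, ?_⟩
        · exact decide_eq_true ⟨hlt p' hp', ⟨hc.1.symm, fun e => hc.2 e.symm⟩⟩
        · exact pvCand_symm q.2 p'.2 (fun e => hc.2 e.symm)
      · exact Or.inl h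
    · right
      rw [PySem.Set.mem_update]
      exact Or.inl hacc

-- A records exactly the sorted pair, under the condition
lemma pv_sorted_eq (x y : String × String) (h : pvCond x y) :
    [if pvTupLt y x then y else x, if pvTupLt x y then y else x] = pvCand x y := by
  have e1 : pvTupLt y x = decide (y.2 < x.2) := by
    simp [pvTupLt, h.1]
  have e2 : pvTupLt x y = decide (x.2 < y.2) := by
    simp [pvTupLt, h.1]
  rw [e1, e2]
  unfold pvCand
  by_cases h2 : y.2 < x.2
  · rw [if_pos (decide_eq_true h2), if_neg (by simp [not_lt_of_gt h2]), if_pos h2]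
  · have h3 : x.2 < y.2 := lt_of_le_of_ne (not_lt.mp h2) h.2
    rw [if_neg (by simp [h2]), if_pos (decide_eq_true h3), if_neg h2]

-- characterization of A
lemma pv_A_char (xs : List (String × String)) :
    main_compare xs = PySem.Set.ofList ((PySem.List.enumerate xs).flatMap (pvRowSq xs)) := by
  unfold main_compare
  have h1 : ∀ (x : String × String) (m : List (List (String × String))),
      xs.foldl (fun matches_ compare_name =>
        if x.1 = compare_name.1 ∧ x.2 ≠ compare_name.2 then
          let matchL := [x, compare_name]
          let sorted_match := [if pvTupLt compare_name x then compare_name else x,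
                               if pvTupLt x compare_name then compare_name else x]
          if sorted_match ∉ matches_ ∧ matchL.length > 1 then matches_ ++ [sorted_match]
          else matches_
        else matches_) m
      = PySem.Set.update m ((xs.filter (fun y => decide (pvCond x y))).map (pvCand x)) := by
    intro x m
    have hf : (fun (matches_ : List (List (String × String))) compare_name =>
        if x.1 = compare_name.1 ∧ x.2 ≠ compare_name.2 then
          let matchL := [x, compare_name]
          let sorted_match := [if pvTupLt compare_name x then compare_name else x,
                               if pvTupLt x compare_name then compare_name else x]
          if sorted_match ∉ matches_ ∧ matchL.length > 1 then matches_ ++ [sorted_match]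
          else matches_
        else matches_)
        = fun m y => if pvCond x y then PySem.Set.add m (pvCand x y) else m := by
      funext m y
      by_cases h : pvCond x y
      · simp only [if_pos h, pv_sorted_eq x y h, PySem.Set.add_eq_ite]
        by_cases hm : pvCand x y ∈ m
        · simp [hm]
        · simp [hm]
      · simp only [if_neg h]
    rw [hf, PySem.List.foldl_ite_eq_foldl_filter (p := pvCond x)
      (f := fun m y => PySem.Set.add m (pvCand x y)), ← PySem.Set.update_map_eq_foldl_add]
  simp only [h1]
  rw [pv_foldl_update, PySem.Set.update_nil_left]
  congr 1
  conv_lhs => rw [← PySem.List.map_snd_enumerate xs 0]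
  rw [List.flatMap_map]
  unfold pvRowSq
  congr 1
  funext p
  rw [List.filter_map, List.map_map]
  rfl

-- the soundex groups built by B
lemma pv_groups (xs : List (String × String)) (c : String) :
    ((PySem.List.enumerate xs).foldl (fun d p => d.modify p.2.1 [] (· ++ [p])) PySem.Dict.empty).getD c []
      = (PySem.List.enumerate xs).filter (fun q => q.2.1 == c) := by
  have h := PySem.Dict.getD_foldl_modify_append
    ((PySem.List.enumerate xs).map (fun p => (p.2.1, p))) PySem.Dict.empty c
  rw [List.foldl_map] at h
  rw [PySem.Dict.getD_empty, List.nil_append, List.filter_map, List.map_map] at h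
  exact h.trans (List.map_id' _)

-- B's inner loop, with the match list tracking the seen set
lemma pv_innerFold (p : Int × (String × String)) (l : List (Int × (String × String)))
    (seen : List ((String × String) × (String × String))) (out : List (List (String × String)))
    (hout : out = seen.map pvToL) :
    l.foldl (fun st q =>
          if q.1 > p.1 ∧ q.2.2 ≠ p.2.2 then
            if (if p.2.2 ≤ q.2.2 then (p.2, q.2) else (q.2, p.2)) ∉ st.2 then
              (st.1 ++ [[(if p.2.2 ≤ q.2.2 then (p.2, q.2) else (q.2, p.2)).1,
                         (if p.2.2 ≤ q.2.2 then (p.2, q.2) else (q.2, p.2)).2]],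
               PySem.Set.add st.2 (if p.2.2 ≤ q.2.2 then (p.2, q.2) else (q.2, p.2)))
            else st
          else st) (out, seen)
      = ((PySem.Set.update seen ((l.filter (fun q => decide (q.1 > p.1 ∧ q.2.2 ≠ p.2.2))).map
            (fun q => if p.2.2 ≤ q.2.2 then (p.2, q.2) else (q.2, p.2)))).map pvToL,
         PySem.Set.update seen ((l.filter (fun q => decide (q.1 > p.1 ∧ q.2.2 ≠ p.2.2))).map
            (fun q => if p.2.2 ≤ q.2.2 then (p.2, q.2) else (q.2, p.2)))) := by
  induction l generalizing seen out with
  | nil => simp [PySem.Set.update_nil, hout]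
  | cons q t ih =>
    rw [List.foldl_cons, List.filter_cons]
    by_cases hc : q.1 > p.1 ∧ q.2.2 ≠ p.2.2
    · rw [if_pos (decide_eq_true hc), List.map_cons, PySem.Set.update_cons, if_pos hc]
      show List.foldl _ (if (if p.2.2 ≤ q.2.2 then (p.2, q.2) else (q.2, p.2)) ∉ seen
        then (out ++ [_], PySem.Set.add seen _) else (out, seen)) t = _
      by_cases hm : (if p.2.2 ≤ q.2.2 then (p.2, q.2) else (q.2, p.2)) ∈ seen
      · rw [if_neg (not_not_intro hm), PySem.Set.add_of_mem hm]
        exact ih seen out hout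
      · rw [if_pos hm, PySem.Set.add_of_not_mem hm]
        exact ih _ _ (by rw [hout, List.map_append]; rfl)
    · rw [if_neg hc]
      simp only [decide_eq_false hc, Bool.false_eq_true, if_false]
      exact ih seen out hout

-- B's outer loop
lemma pv_outerFold (inner : (Int × (String × String)) → List (Int × (String × String)))
    (R : List (Int × (String × String)))
    (seen : List ((String × String) × (String × String))) (out : List (List (String × String)))
    (hout : out = seen.map pvToL) :
    R.foldl (fun st p =>
      (inner p).foldl
        (fun st q =>
          if q.1 > p.1 ∧ q.2.2 ≠ p.2.2 then
            if (if p.2.2 ≤ q.2.2 then (p.2, q.2) else (q.2, p.2)) ∉ st.2 then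
              (st.1 ++ [[(if p.2.2 ≤ q.2.2 then (p.2, q.2) else (q.2, p.2)).1,
                         (if p.2.2 ≤ q.2.2 then (p.2, q.2) else (q.2, p.2)).2]],
               PySem.Set.add st.2 (if p.2.2 ≤ q.2.2 then (p.2, q.2) else (q.2, p.2)))
            else st
          else st) st) (out, seen)
      = ((R.foldl (fun s p => PySem.Set.update s (((inner p).filter (fun q => decide (q.1 > p.1 ∧ q.2.2 ≠ p.2.2))).map
            (fun q => if p.2.2 ≤ q.2.2 then (p.2, q.2) else (q.2, p.2)))) seen).map pvToL,
         R.foldl (fun s p => PySem.Set.update s (((inner p).filter (fun q => decide (q.1 > p.1 ∧ q.2.2 ≠ p.2.2))).map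
            (fun q => if p.2.2 ≤ q.2.2 then (p.2, q.2) else (q.2, p.2)))) seen) := by
  induction R generalizing seen out with
  | nil => simp [hout]
  | cons p R' ih =>
    simp only [List.foldl_cons]
    rw [pv_innerFold p (inner p) seen out hout]
    exact ih _ _ rfl

-- characterization of B
lemma pv_B_char (xs : List (String × String)) :
    main_compare_alt xs = PySem.Set.ofList ((PySem.List.enumerate xs).flatMap (pvRowTri xs)) := by
  unfold main_compare_alt
  simp only [PySem.Set.empty]
  rw [pv_outerFold _ _ [] [] rfl]
  simp only [pv_groups]
  rw [pv_foldl_update, PySem.Set.update_nil_left, pv_map_ofList]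
  congr 1
  rw [List.map_flatMap]
  congr 1
  funext p
  rw [List.map_map, List.filter_filter]
  unfold pvRowTri
  have hfun : (pvToL ∘ fun q : Int × (String × String) =>
      if p.2.2 ≤ q.2.2 then (p.2, q.2) else (q.2, p.2))
      = fun q : Int × (String × String) => pvCand p.2 q.2 := by
    funext q
    exact pvToL_pair p.2 q.2
  have hpred : (fun q : Int × (String × String) =>
      decide (q.1 > p.1 ∧ q.2.2 ≠ p.2.2) && (q.2.1 == p.2.1))
      = fun q : Int × (String × String) => decide (p.1 < q.1 ∧ pvCond p.2 q.2) := by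
    funext q
    rw [Bool.eq_iff_iff]
    simp only [Bool.and_eq_true, decide_eq_true_eq, beq_iff_eq]
    constructor
    · rintro ⟨⟨ha, hb⟩, hcx⟩
      exact ⟨ha, hcx.symm, fun e => hb e.symm⟩
    · rintro ⟨ha, hb, hcx⟩
      exact ⟨⟨ha, fun e => hcx e.symm⟩, hb.symm⟩
  rw [hfun, hpred]

-- ===== VERDICT (by name: the statement is the Claim_ definition above) =====
theorem main_compare_spec : Claim_equal_main_compare := by
  intro xs _
  show main_compare xs = main_compare_alt xs
  rw [pv_A_char, pv_B_char, ← PySem.Set.update_nil_left, ← PySem.Set.update_nil_left,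
    ← pv_foldl_update, ← pv_foldl_update]
  exact pv_rows_eq xs _ [] List.suffix_rfl (fun p hp q hq _ _ => Or.inl hq)
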